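-- pv_equiv track=rewrite | github.com/Xiozzz/python-game | patience.py | checkCoords
-- ===== SOURCE A (Python) =====
-- CARDS = [
-- 'A01', 'A02', 'A03', 'A04', 'A05', 'A06', 'A07', 'A08', 'A09', 'A10', 'A11', 'A12', 'A13',
-- 'B01', 'B02', 'B03', 'B04', 'B05', 'B06', 'B07', 'B08', 'B09', 'B10', 'B11', 'B12', 'B13',
-- 'C01', 'C02', 'C03', 'C04', 'C05', 'C06', 'C07', 'C08', 'C09', 'C10', 'C11', 'C12', 'C13',
-- 'D01', 'D02', 'D03', 'D04', 'D05', 'D06', 'D07', 'D08', 'D09', 'D10', 'D11', 'D12', 'D13'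
-- ]
--
-- POSITIONS = [
-- 'a1', 'a2', 'a3', 'a4', 'a5', 'a6', 'a7',
-- 'b1', 'b2', 'b3', 'b4', 'b5', 'b6', 'b7',
-- 'c1', 'c2', 'c3', 'c4', 'c5', 'c6', 'c7',
-- 'd1', 'd2', 'd3', 'd4', 'd5', 'd6', 'd7',
-- 'e1', 'e2', 'e3', 'e4', 'e5', 'e6', 'e7',
-- 'f1', 'f2', 'f3', 'f4', 'f5', 'f6', 'f7',
-- 'g1', 'g2', 'g3', 'g4', 'g5', 'g6', 'g7',
-- 'h1', 'h2', 'h3', 'h4', 'h5', 'h6', 'h7',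
-- 'i1', 'i2', 'i3', 'i4', 'i5', 'i6', 'i7',
-- 'j1', 'j2', 'j3', 'j4', 'j5', 'j6', 'j7',
-- 'k1', 'k2', 'k3', 'k4', 'k5', 'k6', 'k7',
-- 'l1', 'l2', 'l3', 'l4', 'l5', 'l6', 'l7',
-- 'm1', 'm2', 'm3', 'm4', 'm5', 'm6', 'm7',
-- 'n1', 'n2', 'n3', 'n4', 'n5', 'n6', 'n7',
-- 'o1', 'o2', 'o3', 'o4', 'o5', 'o6', 'o7'
-- ]
--
-- def checkCoords(userInput, action):
-- 	"check if coords or card name is valid"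
--
-- 	for coord in POSITIONS:
-- 		if coord == userInput:
-- 			return True
-- 		if coord[::-1] == userInput: #reversed sting, 1a, 7i, ...works
-- 			return True
--
-- 	for name in CARDS:
-- 		if name == userInput and action == "moveFrom":
-- 			return True
--
-- 	return False
-- ===== SOURCE B (Python) =====
-- def checkCoords(userInput, action):
--     "check if coords or card name is valid"
--     s = userInput
--     if len(s) == 2:
--         a, b = s[0], s[1]
--         return ((a in "abcdefghijklmno" and b in "1234567")
--                 or (a in "1234567" and b in "abcdefghijklmno"))
--     if len(s) == 3 and action == "moveFrom":
--         x, d1, d2 = s[0], s[1], s[2]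
--         if x in "ABCD" and d1 in "0123456789" and d2 in "0123456789":
--             n = 10 * (ord(d1) - 48) + (ord(d2) - 48)
--             return 1 <= n <= 13
--     return False
-- ===== Notes on version B (the rewrite author's own statement) =====
-- stated objective: faster
-- what changed: Replaces the two table scans over the 105-entry POSITIONS list (each entry also reversed per comparison) and the 52-entry CARDS list with a closed-form character-level format check: length guard, letter/digit range tests in both orientations, and an arithmetic 01-13 range test for card names.
import Mathlib
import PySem

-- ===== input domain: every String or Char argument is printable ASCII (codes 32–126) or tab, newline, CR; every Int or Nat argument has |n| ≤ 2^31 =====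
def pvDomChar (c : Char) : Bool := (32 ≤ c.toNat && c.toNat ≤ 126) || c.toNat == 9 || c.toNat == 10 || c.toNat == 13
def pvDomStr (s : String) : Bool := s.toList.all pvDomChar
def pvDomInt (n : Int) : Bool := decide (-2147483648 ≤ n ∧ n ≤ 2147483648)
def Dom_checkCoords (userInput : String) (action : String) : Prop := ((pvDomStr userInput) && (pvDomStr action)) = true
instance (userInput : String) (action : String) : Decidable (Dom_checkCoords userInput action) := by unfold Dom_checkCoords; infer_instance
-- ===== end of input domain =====

-- B replaces A's scans over the 105-entry POSITIONS table (with a reversal per entry) and the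
-- 52-entry CARDS table by a constant number of character range tests (objective: faster, constant factor).

-- ===== PORT A =====
def pvPOSITIONS : List String := ["a1", "a2", "a3", "a4", "a5", "a6", "a7", "b1", "b2", "b3", "b4", "b5", "b6", "b7", "c1", "c2", "c3", "c4", "c5", "c6", "c7", "d1", "d2", "d3", "d4", "d5", "d6", "d7", "e1", "e2", "e3", "e4", "e5", "e6", "e7", "f1", "f2", "f3", "f4", "f5", "f6", "f7", "g1", "g2", "g3", "g4", "g5", "g6", "g7", "h1", "h2", "h3", "h4", "h5", "h6", "h7", "i1", "i2", "i3", "i4", "i5", "i6", "i7", "j1", "j2", "j3", "j4", "j5", "j6", "j7", "k1", "k2", "k3", "k4", "k5", "k6", "k7", "l1", "l2", "l3", "l4", "l5", "l6", "l7", "m1", "m2", "m3", "m4", "m5", "m6", "m7", "n1", "n2", "n3", "n4", "n5", "n6", "n7", "o1", "o2", "o3", "o4", "o5", "o6", "o7"]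

def pvCARDS : List String := ["A01", "A02", "A03", "A04", "A05", "A06", "A07", "A08", "A09", "A10", "A11", "A12", "A13", "B01", "B02", "B03", "B04", "B05", "B06", "B07", "B08", "B09", "B10", "B11", "B12", "B13", "C01", "C02", "C03", "C04", "C05", "C06", "C07", "C08", "C09", "C10", "C11", "C12", "C13", "D01", "D02", "D03", "D04", "D05", "D06", "D07", "D08", "D09", "D10", "D11", "D12", "D13"]

-- first loop: for coord in POSITIONS: return True on coord == userInput or coord[::-1] == userInput
def pvPosLoop (userInput : String) : List String → Bool
  | [] => false
  | coord :: rest =>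
    if coord == userInput then true
    else if PySem.Str.slice? coord none none (-1) == some userInput then true  -- coord[::-1] == userInput
    else pvPosLoop userInput rest

-- second loop: for name in CARDS: return True on name == userInput and action == "moveFrom"
def pvCardLoop (userInput : String) (action : String) : List String → Bool
  | [] => false
  | name :: rest =>
    if name == userInput && action == "moveFrom" then true
    else pvCardLoop userInput action rest

def checkCoords (userInput : String) (action : String) : Bool :=
  if pvPosLoop userInput pvPOSITIONS then true
  else pvCardLoop userInput action pvCARDS

-- ===== PORT B =====
-- transliteration of Source B; Python's `c in "abcdefghijklmno"` for the 1-char string c is the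
-- membership test `"abcdefghijklmno".toList.contains c`, and ord(c) is c.toNat
def checkCoords_alt (userInput : String) (action : String) : Bool :=
  match userInput.toList with
  | [a, b] =>
      ("abcdefghijklmno".toList.contains a && "1234567".toList.contains b) ||
      ("1234567".toList.contains a && "abcdefghijklmno".toList.contains b)
  | [x, d1, d2] =>
      action == "moveFrom" &&
      (if "ABCD".toList.contains x && "0123456789".toList.contains d1 && "0123456789".toList.contains d2 then
        decide (1 ≤ 10 * (d1.toNat - 48) + (d2.toNat - 48) ∧ 10 * (d1.toNat - 48) + (d2.toNat - 48) ≤ 13)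
      else false)
  | _ => false

-- ===== PRECONDITION & SPEC =====
def Spec_checkCoords (userInput : String) (action : String) (out : Bool) : Prop := out = checkCoords_alt userInput action
instance (userInput : String) (action : String) (out : Bool) : Decidable (Spec_checkCoords userInput action out) := by unfold Spec_checkCoords; infer_instance

-- ===== CLAIM (what is proved, stated in full; the proofs are below) =====
def Claim_equal_checkCoords : Prop := ∀ (userInput : String) (action : String), Dom_checkCoords userInput action → Spec_checkCoords userInput action (checkCoords userInput action)

-- ===== LEMMAS AND PROOFS =====

-- Char.toNat is injective, so char equalities can be moved to the code level for omega
theorem pvCharEq (c x : Char) : (c = x) ↔ c.toNat = x.toNat :=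
  eq_iff_eq_of_cmp_eq_cmp (rfl : cmp c x = cmp c.toNat x.toNat)

-- the character ranges the two tables are built from
def pvLETTERS : List Char := ['a', 'b', 'c', 'd', 'e', 'f', 'g', 'h', 'i', 'j', 'k', 'l', 'm', 'n', 'o']
def pvPDIGITS : List Char := ['1', '2', '3', '4', '5', '6', '7']
def pvSUITS : List Char := ['A', 'B', 'C', 'D']
def pvD10 : List Char := ['0', '1', '2', '3', '4', '5', '6', '7', '8', '9']
def pvNUMS : List (List Char) := [['0', '1'], ['0', '2'], ['0', '3'], ['0', '4'], ['0', '5'], ['0', '6'], ['0', '7'], ['0', '8'], ['0', '9'], ['1', '0'], ['1', '1'], ['1', '2'], ['1', '3']]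

theorem pvLets : "abcdefghijklmno".toList = pvLETTERS := rfl
theorem pvPDs : "1234567".toList = pvPDIGITS := rfl
theorem pvSts : "ABCD".toList = pvSUITS := rfl
theorem pvD10s : "0123456789".toList = pvD10 := rfl

-- what A compares a table entry's reversal against
def pvRevStr (s : String) : String := String.ofList s.toList.reverse

-- A's first loop is membership in the table or in the reversed table
theorem pvPosLoop_eq (u : String) (lst : List String) :
    pvPosLoop u lst = (decide (u ∈ lst) || decide (u ∈ lst.map pvRevStr)) := by
  induction lst with
  | nil => simp [pvPosLoop]
  | cons c rest ih =>
    simp only [pvPosLoop, PySem.Str.slice?_none_none_neg_one, Option.some_beq_some, ih,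
      List.map_cons, List.mem_cons, Bool.if_true_left, Bool.decide_coe, beq_iff_eq, pvRevStr]
    rw [Bool.eq_iff_iff]
    simp only [Bool.or_eq_true, decide_eq_true_eq]
    constructor
    · rintro (h | h | h | h) <;> tauto
    · rintro ((h | h) | (h | h)) <;> tauto

-- A's second loop is membership in CARDS conjoined with the action test
theorem pvCardLoop_eq (u a : String) (lst : List String) :
    pvCardLoop u a lst = (decide (u ∈ lst) && (a == "moveFrom")) := by
  induction lst with
  | nil => simp [pvCardLoop]
  | cons c rest ih =>
    simp only [pvCardLoop, ih, List.mem_cons, Bool.if_true_left, Bool.decide_coe, beq_iff_eq]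
    rw [Bool.eq_iff_iff]
    simp only [Bool.or_eq_true, Bool.and_eq_true, decide_eq_true_eq, beq_iff_eq]
    constructor
    · rintro (⟨h1, h2⟩ | ⟨h1, h2⟩) <;> tauto
    · rintro ⟨h1 | h1, h2⟩ <;> tauto

theorem pvA_norm (u a : String) : checkCoords u a =
    (decide (u ∈ pvPOSITIONS) || decide (u ∈ pvPOSITIONS.map pvRevStr) ||
      (decide (u ∈ pvCARDS) && (a == "moveFrom"))) := by
  simp only [checkCoords, pvPosLoop_eq, pvCardLoop_eq, Bool.if_true_left, Bool.decide_coe]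

-- the two tables are products of the character ranges
theorem pvPos_prod : pvPOSITIONS =
    pvLETTERS.flatMap (fun l => pvPDIGITS.map (fun d => String.ofList [l, d])) := rfl

theorem pvRevPos_prod : pvPOSITIONS.map pvRevStr =
    pvLETTERS.flatMap (fun l => pvPDIGITS.map (fun d => String.ofList [d, l])) := rfl

theorem pvCards_prod : pvCARDS =
    pvSUITS.flatMap (fun s => pvNUMS.map (fun n => String.ofList (s :: n))) := rfl

-- membership in such a product, read off the character list of the candidate
theorem pvMemProd2 (u : String) (L D : List Char) :
    u ∈ L.flatMap (fun l => D.map (fun d => String.ofList [l, d])) ↔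
      ∃ x ∈ L, ∃ y ∈ D, u.toList = [x, y] := by
  simp only [List.mem_flatMap, List.mem_map, ← String.toList_inj, String.toList_ofList] <;>
    (constructor <;> rintro ⟨x, hx, y, hy, h⟩ <;> exact ⟨x, hx, y, hy, h.symm⟩)

theorem pvMemProd2R (u : String) (L D : List Char) :
    u ∈ L.flatMap (fun l => D.map (fun d => String.ofList [d, l])) ↔
      ∃ x ∈ L, ∃ y ∈ D, u.toList = [y, x] := by
  simp only [List.mem_flatMap, List.mem_map, ← String.toList_inj, String.toList_ofList] <;>
    (constructor <;> rintro ⟨x, hx, y, hy, h⟩ <;> exact ⟨x, hx, y, hy, h.symm⟩)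

theorem pvMemProdC (u : String) (S : List Char) (N : List (List Char)) :
    u ∈ S.flatMap (fun s => N.map (fun n => String.ofList (s :: n))) ↔
      ∃ x ∈ S, ∃ n ∈ N, u.toList = x :: n := by
  simp only [List.mem_flatMap, List.mem_map, ← String.toList_inj, String.toList_ofList] <;>
    (constructor <;> rintro ⟨x, hx, y, hy, h⟩ <;> exact ⟨x, hx, y, hy, h.symm⟩)

-- the card-number table is exactly the two-digit range 01..13
theorem pvNums_iff (x y : Char) : [x, y] ∈ pvNUMS ↔
    (x ∈ pvD10 ∧ y ∈ pvD10 ∧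
      1 ≤ 10 * (x.toNat - 48) + (y.toNat - 48) ∧ 10 * (x.toNat - 48) + (y.toNat - 48) ≤ 13) := by
  simp only [pvNUMS, pvD10, List.mem_cons, List.not_mem_nil, or_false,
    List.cons.injEq, and_true, pvCharEq, show ('0' : Char).toNat = 48 from rfl, show ('1' : Char).toNat = 49 from rfl, show ('2' : Char).toNat = 50 from rfl, show ('3' : Char).toNat = 51 from rfl, show ('4' : Char).toNat = 52 from rfl, show ('5' : Char).toNat = 53 from rfl, show ('6' : Char).toNat = 54 from rfl, show ('7' : Char).toNat = 55 from rfl, show ('8' : Char).toNat = 56 from rfl, show ('9' : Char).toNat = 57 from rfl]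
  omega

set_option maxHeartbeats 1000000 in
theorem pv_main (u a : String) : checkCoords u a = checkCoords_alt u a := by
  rw [pvA_norm, pvRevPos_prod, pvPos_prod, pvCards_prod, Bool.eq_iff_iff]
  simp only [Bool.or_eq_true, Bool.and_eq_true, decide_eq_true_eq, pvMemProd2, pvMemProd2R, pvMemProdC,
    checkCoords_alt, List.contains_eq_mem, pvLets, pvPDs, pvSts, pvD10s,
    Bool.if_false_right, beq_iff_eq]
  rcases hL : u.toList with _ | ⟨c1, _ | ⟨c2, _ | ⟨c3, _ | ⟨c4, rest⟩⟩⟩⟩ <;>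
    simp only [hL, List.cons.injEq, reduceCtorEq, and_false, false_and, and_true, true_and,
      or_false, false_or, exists_false, iff_false, not_or, pvNums_iff,
      Bool.or_eq_true, Bool.and_eq_true, decide_eq_true_eq, Bool.if_false_right,
      List.contains_eq_mem, pvLets, pvPDs, pvSts, pvD10s, beq_iff_eq]
  -- one character: the card clause needs a two-character number
  case cons.nil =>
    rintro ⟨⟨x, hx, n, hn, hc, h2⟩, -⟩
    cases h2
    simp [pvNUMS] at hn
  -- two characters: the position formats
  case cons.cons.nil =>
    constructor
    · rintro ((⟨x, hx, y, hy, rfl, rfl⟩ | ⟨x, hx, y, hy, rfl, rfl⟩) | ⟨⟨x, hx, n, hn, rfl, h2⟩, -⟩)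
      · exact Or.inl ⟨hx, hy⟩
      · exact Or.inr ⟨hy, hx⟩
      · cases h2; simp [pvNUMS] at hn
    · rintro (⟨h1, h2⟩ | ⟨h1, h2⟩)
      · exact Or.inl (Or.inl ⟨c1, h1, c2, h2, rfl, rfl⟩)
      · exact Or.inl (Or.inr ⟨c2, h2, c1, h1, rfl, rfl⟩)
  -- three characters: the card names
  case cons.cons.cons.nil =>
    constructor
    · rintro ⟨⟨x, hx, n, hn, rfl, h2⟩, hact⟩
      cases h2
      rw [pvNums_iff] at hn
      exact ⟨hact, by tauto⟩
    · rintro ⟨hact, ⟨⟨hx, hd1⟩, hd2⟩, hr1, hr2⟩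
      refine ⟨⟨c1, hx, [c2, c3], ?_, rfl, rfl⟩, hact⟩
      rw [pvNums_iff]; tauto
  -- four or more characters: both sides false
  case cons.cons.cons.cons =>
    rintro ⟨⟨x, hx, n, hn, hc, h2⟩, hact⟩
    simp only [pvNUMS, List.mem_cons, List.not_mem_nil, or_false] at hn
    rcases hn with rfl | rfl | rfl | rfl | rfl | rfl | rfl | rfl | rfl | rfl | rfl | rfl | rfl <;>
      simp at h2

-- ===== VERDICT (by name: the statement is the Claim_ definition above) =====
theorem checkCoords_spec : Claim_equal_checkCoords := by
  intro u a _
  unfold Spec_checkCoords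
  exact pv_main u a
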